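-- pv_equiv track=rewrite | github.com/aorursy/KT_dataset_py | andrefelicio_fpe-l01.py | check_duplicated_numbers_limit
-- ===== SOURCE A (Python) =====
-- def check_duplicated_numbers_limit(numbers):
--     LIMIT = 6
--     count = 0
--     for number in numbers:
--         if numbers.count(number) == 1:
--             count = count + 1
--
--     if count >= LIMIT:
--         return True
--     else:
--         return False
-- ===== SOURCE B (Python) =====
-- def check_duplicated_numbers_limit(numbers):
--     s = sorted(numbers)
--     singles = 0
--     i = 0
--     n = len(s)
--     while i < n:
--         j = i + 1
--         while j < n and s[j] == s[i]:
--             j += 1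
--         if j - i == 1:
--             singles += 1
--         i = j
--     return singles >= 6
-- ===== Notes on version B (the rewrite author's own statement) =====
-- stated objective: faster
-- what changed: Sorts the list once and counts singleton runs in a single grouping scan instead of A's per-element numbers.count rescans.
import Mathlib
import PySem

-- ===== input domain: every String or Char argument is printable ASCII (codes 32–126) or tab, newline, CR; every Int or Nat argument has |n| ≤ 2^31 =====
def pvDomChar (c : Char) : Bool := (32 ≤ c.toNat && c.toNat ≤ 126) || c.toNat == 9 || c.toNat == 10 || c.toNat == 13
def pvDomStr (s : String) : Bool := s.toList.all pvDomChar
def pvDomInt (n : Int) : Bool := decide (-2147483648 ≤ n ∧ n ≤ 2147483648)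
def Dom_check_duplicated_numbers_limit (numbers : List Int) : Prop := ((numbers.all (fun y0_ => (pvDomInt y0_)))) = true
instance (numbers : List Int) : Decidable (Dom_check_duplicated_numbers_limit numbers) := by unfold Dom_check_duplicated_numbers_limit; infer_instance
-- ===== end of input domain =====

-- B sorts once and counts singleton runs in one grouping scan instead of A's per-element count rescans (faster).

-- ===== PORT A =====
def check_duplicated_numbers_limit (numbers : List Int) : Bool :=
  let LIMIT : Int := 6
  let count : Int := numbers.foldl
    (fun count number => if PySem.List.count numbers number == 1 then count + 1 else count) 0
  if count ≥ LIMIT then true else false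

-- ===== PORT B =====
-- B's inner while loop advances j past the run of elements equal to s[i]; on the list suffix
-- this is takeWhile/dropWhile, and the outer while loop is the recursion on the remaining suffix.
def pvRunSingles : List Int → Int
  | [] => 0
  | x :: xs =>
      (if (xs.takeWhile (fun y => y == x)).length == 0 then 1 else 0)
        + pvRunSingles (xs.dropWhile (fun y => y == x))
termination_by t => t.length
decreasing_by
  simpa using Nat.lt_succ_of_le (List.length_dropWhile_le _ _)

def check_duplicated_numbers_limit_alt (numbers : List Int) : Bool :=
  decide (pvRunSingles (PySem.List.sorted numbers (fun x => x) false) ≥ 6)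

-- ===== PRECONDITION & SPEC =====
def Spec_check_duplicated_numbers_limit (numbers : List Int) (out : Bool) : Prop := out = check_duplicated_numbers_limit_alt numbers
instance (numbers : List Int) (out : Bool) : Decidable (Spec_check_duplicated_numbers_limit numbers out) := by unfold Spec_check_duplicated_numbers_limit; infer_instance

-- ===== CLAIM (what is proved, stated in full; the proofs are below) =====
def Claim_equal_check_duplicated_numbers_limit : Prop := ∀ (numbers : List Int), Dom_check_duplicated_numbers_limit numbers → Spec_check_duplicated_numbers_limit numbers (check_duplicated_numbers_limit numbers)

-- ===== LEMMAS AND PROOFS =====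

-- In a nondecreasing list, the singleton-run count equals, for any nodup list u with the
-- same members, the number of elements of u occurring exactly once.
theorem runSingles_eq (t u : List Int) (ht : t.Pairwise (· ≤ ·)) (hu : u.Nodup)
    (hm : ∀ y, y ∈ u ↔ y ∈ t) :
    pvRunSingles t = (u.countP (fun y => List.count y t == 1) : Int) := by
  induction t using pvRunSingles.induct generalizing u with
  | case1 =>
      have : u = [] := List.eq_nil_iff_forall_not_mem.mpr (fun y hy => by simpa using (hm y).mp hy)
      simp [pvRunSingles, this]
  | case2 x xs ih =>
      set a := xs.takeWhile (fun y => y == x) with ha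
      set r := xs.dropWhile (fun y => y == x) with hr
      have hxs : a ++ r = xs := List.takeWhile_append_dropWhile
      have hamem : ∀ y ∈ a, y = x := by
        intro y hy
        have := List.mem_takeWhile_imp hy
        simpa using this
      have hxsp : xs.Pairwise (· ≤ ·) := (List.pairwise_cons.mp ht).2
      have hxle : ∀ y ∈ xs, x ≤ y := (List.pairwise_cons.mp ht).1
      have hrp : r.Pairwise (· ≤ ·) := List.Pairwise.sublist (List.dropWhile_sublist _) hxsp
      have hxr : x ∉ r := by
        intro hxr
        cases hz : r with
        | nil => simp [hz] at hxr
        | cons z r' =>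
          have hzx : ¬ (z == x) = true := by
            have := List.head?_dropWhile_not (fun y => y == x) xs
            rw [← hr, hz] at this
            simpa using this
          have hzx' : z ≠ x := by simpa using hzx
          have hzmem : z ∈ xs := by rw [← hxs, hz]; simp
          have hxz : x < z := lt_of_le_of_ne (hxle z hzmem) (Ne.symm hzx')
          rw [hz] at hxr
          rcases List.mem_cons.mp hxr with h | h
          · exact hzx' h.symm
          · have : z ≤ x := (List.pairwise_cons.mp (hz ▸ hrp)).1 x h
            omega
      -- counts in t
      have hcx : List.count x (x :: xs) = a.length + 1 := by
        have hca : List.count x a = a.length :=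
          List.count_eq_length.mpr (fun y hy => ((hamem y hy).symm ▸ rfl))
        have hcr : List.count x r = 0 := List.count_eq_zero.mpr hxr
        rw [List.count_cons_self, ← hxs, List.count_append, hca, hcr]
      have hcy : ∀ y : Int, y ≠ x → List.count y (x :: xs) = List.count y r := by
        intro y hy
        have hca : List.count y a = 0 := List.count_eq_zero.mpr
          (fun hmem => hy (hamem y hmem))
        have h1 : List.count y (x :: xs) = List.count y xs := by
          simp only [List.count_cons]
          simp [Ne.symm hy]
        rw [h1, ← hxs, List.count_append, hca, Nat.zero_add]
      -- u decomposes as x :: u.erase x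
      have hxu : x ∈ u := (hm x).mpr (by simp)
      have hperm : u.Perm (x :: u.erase x) := List.perm_cons_erase hxu
      have hu' : (u.erase x).Nodup := hu.erase x
      have hm' : ∀ y, y ∈ u.erase x ↔ y ∈ r := by
        intro y
        rw [hu.mem_erase_iff, hm y]
        constructor
        · rintro ⟨hne, hmem⟩
          rcases List.mem_cons.mp hmem with h | h
          · exact absurd h hne
          · rw [← hxs] at h
            rcases List.mem_append.mp h with h | h
            · exact absurd (hamem y h) hne
            · exact h
        · intro hmem
          refine ⟨fun h => hxr (h ▸ hmem), List.mem_cons.mpr (Or.inr ?_)⟩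
          rw [← hxs]; exact List.mem_append.mpr (Or.inr hmem)
      have hcongr : (u.erase x).countP (fun y => List.count y (x :: xs) == 1)
          = (u.erase x).countP (fun y => List.count y r == 1) := by
        apply List.countP_congr
        intro y hy
        have hne : y ≠ x := (hu.mem_erase_iff.mp hy).1
        rw [hcy y hne]
      rw [hperm.countP_eq, List.countP_cons, hcongr, pvRunSingles, ← ha, ← hr,
        ih (u.erase x) hrp hu' hm', hcx]
      have : ((a.length + 1 == 1) = (a.length == 0)) := by
        cases a <;> simp
      rw [this]
      push_cast
      ring

-- countP of the singleton predicate over the list equals it over the distinct elements.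
theorem countP_singleton_dedup (l : List Int) :
    l.countP (fun x => PySem.List.count l x == 1)
      = (PySem.Set.ofList l).countP (fun x => PySem.List.count l x == 1) := by
  set p : Int → Bool := fun x => PySem.List.count l x == 1 with hp
  rw [List.countP_eq_length_filter, List.countP_eq_length_filter]
  apply List.Perm.length_eq
  rw [List.perm_iff_count]
  intro a
  by_cases ha : p a = true
  · have h1 : List.count a l = 1 := by
      have := ha; simp [hp, PySem.List.count] at this; simpa [PySem.List.count] using this
    rw [List.count_filter ha, List.count_filter ha, h1]
    have hmem : a ∈ l := by
      by_contra hn; rw [List.count_eq_zero.mpr hn] at h1; omega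
    exact (List.count_eq_one_of_mem (PySem.Set.nodup_ofList l)
      ((PySem.Set.mem_ofList l a).mpr hmem)).symm
  · have h0 : ∀ m : List Int, List.count a (m.filter p) = 0 := by
      intro m
      rw [List.count_eq_zero]
      intro hmem
      exact ha (List.of_mem_filter hmem)
    rw [h0, h0]

-- ===== VERDICT (by name: the statement is the Claim_ definition above) =====
theorem check_duplicated_numbers_limit_spec : Claim_equal_check_duplicated_numbers_limit := by
  intro numbers _
  unfold Spec_check_duplicated_numbers_limit check_duplicated_numbers_limit check_duplicated_numbers_limit_alt
  dsimp only
  set s := PySem.List.sorted numbers (fun x => x) false with hs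
  have hperm : s.Perm numbers := PySem.List.sorted_perm numbers (fun x => x) false
  have hpw : s.Pairwise (· ≤ ·) := by
    simpa using PySem.List.sorted_pairwise numbers (fun x => x)
  have hrun := runSingles_eq s (PySem.Set.ofList numbers) hpw
    (PySem.Set.nodup_ofList numbers)
    (fun y => by rw [PySem.Set.mem_ofList]; exact (hperm.mem_iff).symm)
  have hcnt : (PySem.Set.ofList numbers).countP (fun y => List.count y s == 1)
      = (PySem.Set.ofList numbers).countP (fun y => PySem.List.count numbers y == 1) := by
    apply List.countP_congr
    intro y _
    rw [hperm.count_eq]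
    simp [PySem.List.count]
  rw [PySem.List.foldl_if_add_one]
  rw [countP_singleton_dedup, hrun, hcnt]
  simp
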